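-- pv_equiv track=rewrite | github.com/mjlavin80/aps_review_classification | sandbox/review_name_class.py | cleanPubMatches
-- ===== SOURCE A (Python) =====
-- def cleanPubMatches(match_list):
--     """
--     Takes list of PublisherName matches in the form of index tuples.
--     Trims PublisherName matches down to just name components.
--     Returns cleaned PublisherNames. Integer part of indices is NOT returned.
--     """
--     cleaned_matches = []
--     for match in match_list:
--         index_to_start = 0
--         for i, x in enumerate(match[1].split()):
--             if x[0].islower() and x[0]!='&':
--                 index_to_start = i+1
--         cleaned_matches.append(' '.join(match[1].split()[index_to_start:]))
--     return cleaned_matches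
-- ===== SOURCE B (Python) =====
-- def cleanPubMatches(match_list):
--     """
--     Backward scan: instead of a full forward pass remembering the last
--     lowercase-starting word, walk from the right end of the split words and
--     stop at the first word that starts with a lowercase non-'&' character;
--     everything to its right is the kept name suffix.
--     """
--     result = []
--     for _, name in match_list:
--         words = name.split()
--         j = len(words)
--         while j > 0 and not (words[j - 1][0].islower() and words[j - 1][0] != '&'):
--             j -= 1
--         result.append(' '.join(words[j:]))
--     return result
-- ===== Notes on version B (the rewrite author's own statement) =====
-- stated objective: alternative
-- what changed: Replaces A's full forward enumerate-pass that remembers the index after the last lowercase-starting word with a backward early-stopping scan that finds the kept suffix directly from the right.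
import Mathlib
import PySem

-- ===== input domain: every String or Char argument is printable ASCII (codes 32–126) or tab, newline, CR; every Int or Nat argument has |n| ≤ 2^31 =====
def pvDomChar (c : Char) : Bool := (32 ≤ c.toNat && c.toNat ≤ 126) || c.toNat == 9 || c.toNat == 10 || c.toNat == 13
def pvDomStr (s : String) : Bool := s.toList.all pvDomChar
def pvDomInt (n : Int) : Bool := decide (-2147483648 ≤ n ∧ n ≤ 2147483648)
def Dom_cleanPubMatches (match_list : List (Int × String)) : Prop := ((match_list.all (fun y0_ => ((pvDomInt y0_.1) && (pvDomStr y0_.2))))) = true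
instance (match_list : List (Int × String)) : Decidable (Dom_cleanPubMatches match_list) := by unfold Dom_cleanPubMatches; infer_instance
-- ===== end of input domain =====

-- B replaces A's full forward pass (remembering the last lowercase-starting word) by a
-- backward scan that stops at the first such word from the right (objective: alternative).

-- ===== PORT A =====
-- x[0].islower() and x[0] != '&' ; split() words are never empty, so x[0] never raises
def pvStartsLowerA (x : String) : Bool :=
  match PySem.Str.pyGet? x 0 with
  | some c => PySem.Chars.islower c && c != '&'
  | none => false

def cleanPubMatches (match_list : List (Int × String)) : List String :=
  match_list.foldl (fun cleaned_matches m =>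
    let words := PySem.Str.split₀ m.2
    let index_to_start : Int := (PySem.List.enumerate words).foldl
      (fun ix p => if pvStartsLowerA p.2 then p.1 + 1 else ix) 0
    cleaned_matches ++ [PySem.Str.join " " (PySem.List.slice words (some index_to_start) none)]) []

-- ===== PORT B =====
def pvStartsLowerB (w : String) : Bool :=
  match PySem.Str.pyGet? w 0 with
  | some c => PySem.Chars.islower c && c != '&'
  | none => false

-- the while loop 'while j > 0 and not pred(words[j-1]): j -= 1', as recursion on j
def pvSuffixStart (words : List String) : Nat → Nat
  | 0 => 0
  | j + 1 => if !pvStartsLowerB (words.getD j "") then pvSuffixStart words j else j + 1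

def cleanPubMatches_alt (match_list : List (Int × String)) : List String :=
  match_list.map (fun m =>
    let words := PySem.Str.split₀ m.2
    PySem.Str.join " " (words.drop (pvSuffixStart words words.length)))

-- ===== PRECONDITION & SPEC =====
def Spec_cleanPubMatches (match_list : List (Int × String)) (out : List String) : Prop := out = cleanPubMatches_alt match_list
instance (match_list : List (Int × String)) (out : List String) : Decidable (Spec_cleanPubMatches match_list out) := by unfold Spec_cleanPubMatches; infer_instance

-- ===== CLAIM (what is proved, stated in full; the proofs are below) =====
def Claim_equal_cleanPubMatches : Prop := ∀ (match_list : List (Int × String)), Dom_cleanPubMatches match_list → Spec_cleanPubMatches match_list (cleanPubMatches match_list)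

-- ===== LEMMAS AND PROOFS =====

theorem pvStartsLowerB_eq (w : String) : pvStartsLowerB w = pvStartsLowerA w := rfl

-- number of trailing words that do NOT start with a lowercase non-'&' char
def pvTrail (ws : List String) : Nat :=
  (ws.reverse.takeWhile (fun w => !pvStartsLowerA w)).length

theorem pvTrail_snoc (ws : List String) (w : String) :
    pvTrail (ws ++ [w]) = if pvStartsLowerA w then 0 else pvTrail ws + 1 := by
  cases h : pvStartsLowerA w <;> simp [pvTrail, h]

theorem enumerate_snoc (ws : List String) (w : String) (s : Int) :
    PySem.List.enumerate (ws ++ [w]) s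
      = PySem.List.enumerate ws s ++ [(s + ws.length, w)] := by
  induction ws generalizing s with
  | nil => simp [PySem.List.enumerate_nil, PySem.List.enumerate_cons]
  | cons x xs ih =>
      simp [PySem.List.enumerate_cons, ih]
      ring_nf

-- A's forward fold computes (length − trailing run), as an Int
theorem foldA_eq (ws : List String) :
    (PySem.List.enumerate ws 0).foldl
        (fun ix p => if pvStartsLowerA p.2 then p.1 + 1 else ix) 0
      = ((ws.length - pvTrail ws : Nat) : Int) := by
  induction ws using List.reverseRecOn with
  | nil => simp [PySem.List.enumerate_nil, pvTrail]
  | append_singleton ws w ih =>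
      rw [enumerate_snoc, List.foldl_append, ih, pvTrail_snoc]
      cases h : pvStartsLowerA w with
      | true => simp [h]
      | false => simp [h]

-- B's backward scan computes the same cut point on the prefix it has scanned
theorem pvSuffixStart_eq (ws : List String) (j : Nat) (hj : j ≤ ws.length) :
    pvSuffixStart ws j = j - pvTrail (ws.take j) := by
  induction j with
  | zero => simp [pvSuffixStart, pvTrail]
  | succ j ih =>
      have hjl : j < ws.length := by omega
      rw [pvSuffixStart, List.take_succ_eq_append_getElem hjl, pvTrail_snoc,
        List.getD_eq_getElem ws "" hjl, pvStartsLowerB_eq]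
      cases h : pvStartsLowerA ws[j] with
      | true => simp
      | false => simp [ih (by omega)]

theorem per_word (ws : List String) :
    PySem.List.slice ws
        (some ((PySem.List.enumerate ws 0).foldl
          (fun ix p => if pvStartsLowerA p.2 then p.1 + 1 else ix) 0)) none
      = ws.drop (pvSuffixStart ws ws.length) := by
  rw [foldA_eq, pvSuffixStart_eq ws ws.length le_rfl, List.take_length,
    PySem.List.slice_from_natCast]

theorem cleanPubMatches_gen (ml : List (Int × String)) (acc : List String) :
    List.foldl (fun cleaned_matches m =>
      cleaned_matches ++ [PySem.Str.join " " (PySem.List.slice (PySem.Str.split₀ m.2)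
        (some ((PySem.List.enumerate (PySem.Str.split₀ m.2) 0).foldl
          (fun ix p => if pvStartsLowerA p.2 then p.1 + 1 else ix) 0)) none)]) acc ml
      = acc ++ cleanPubMatches_alt ml := by
  induction ml generalizing acc with
  | nil => simp [cleanPubMatches_alt]
  | cons m t ih =>
      rw [List.foldl_cons, ih]
      simp only [cleanPubMatches_alt, List.map_cons, per_word]
      simp

-- ===== VERDICT (by name: the statement is the Claim_ definition above) =====
theorem cleanPubMatches_spec : Claim_equal_cleanPubMatches := by
  intro ml _
  show cleanPubMatches ml = cleanPubMatches_alt ml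
  exact (cleanPubMatches_gen ml []).trans (by simp)
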